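-- pv_equiv track=rewrite | github.com/physacco/cv-test | python/video/video_props.py | parse_fourcc
-- ===== SOURCE A (Python) =====
-- def parse_fourcc(value):
--     """Parse cv2.CAP_PROP_FOURCC into a 4-character string.
--     The value obtained by OpenCV is a float number.
--     """
--     value = int(value)
--     cc0 = value & 0xff
--     cc1 = (value >> 8) & 0xff
--     cc2 = (value >> 16) & 0xff
--     cc3 = (value >> 24) & 0xff
--     chars = [chr(i) for i in [cc0, cc1, cc2, cc3]]
--     return ''.join(chars)
-- ===== SOURCE B (Python) =====
-- def parse_fourcc(value):
--     """Parse cv2.CAP_PROP_FOURCC into a 4-character string.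
--     Routes through a textual hexadecimal representation: format the
--     masked value as 8 hex digits and decode the digit pairs in
--     reversed (little-endian) order."""
--     h = format(int(value) & 0xffffffff, '08x')
--     return ''.join(chr(int(h[i:i + 2], 16)) for i in (6, 4, 2, 0))
-- ===== Notes on version B (the rewrite author's own statement) =====
-- stated objective: alternative
-- what changed: B formats the masked value as an 8-digit hexadecimal string and decodes the hex-digit pairs in reversed order, instead of A's four unrolled shift-and-mask byte extractions.
import Mathlib
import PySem

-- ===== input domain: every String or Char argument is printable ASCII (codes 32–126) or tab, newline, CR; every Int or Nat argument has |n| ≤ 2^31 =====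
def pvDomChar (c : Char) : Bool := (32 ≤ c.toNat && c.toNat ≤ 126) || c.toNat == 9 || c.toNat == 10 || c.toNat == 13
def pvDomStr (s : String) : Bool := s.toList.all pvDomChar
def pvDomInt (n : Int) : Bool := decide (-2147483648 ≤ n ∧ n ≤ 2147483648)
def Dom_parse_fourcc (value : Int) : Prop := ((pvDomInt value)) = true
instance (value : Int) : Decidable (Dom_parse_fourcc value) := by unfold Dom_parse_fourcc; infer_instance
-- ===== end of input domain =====

-- B decodes the fourcc through a textual hexadecimal representation (format '08x', then parse the
-- hex-digit pairs in reversed order) instead of A's four unrolled shift-and-mask byte extractions.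

-- ===== PORT A =====
def parse_fourcc (value : Int) : String :=
  let cc0 := PySem.Int.band value 0xff
  let cc1 := PySem.Int.band (value >>> (8 : Nat)) 0xff
  let cc2 := PySem.Int.band (value >>> (16 : Nat)) 0xff
  let cc3 := PySem.Int.band (value >>> (24 : Nat)) 0xff
  let chars := [cc0, cc1, cc2, cc3].map (fun i => Char.ofNat i.toNat)
  String.mk chars

-- ===== PORT B =====
-- hex digit character of d (0 ≤ d < 16), as Python's '%x' formatting uses (lowercase)
def pvHexDigit (d : Nat) : Char :=
  Char.ofNat (if d < 10 then 48 + d else 87 + d)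
-- value of a hex digit character, as Python's int(·, 16) uses (only lowercase digits occur here)
def pvHexVal (c : Char) : Nat :=
  if c.toNat ≤ 57 then c.toNat - 48 else c.toNat - 87
def parse_fourcc_alt (value : Int) : String :=
  let m := (PySem.Int.band value 0xffffffff).toNat
  -- format(m, '08x'): eight hex digits, most significant first (m < 16^8, so no overflow digit)
  let h := (List.range 8).map (fun k => pvHexDigit (m / 16 ^ (7 - k) % 16))
  -- decode the digit pairs at positions 6, 4, 2, 0: int(h[i:i+2], 16)
  let pair := fun (i : Nat) => 16 * pvHexVal (h.getD i ' ') + pvHexVal (h.getD (i + 1) ' ')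
  String.mk ([6, 4, 2, 0].map (fun i => Char.ofNat (pair i)))

-- ===== PRECONDITION & SPEC =====
def Spec_parse_fourcc (value : Int) (out : String) : Prop := out = parse_fourcc_alt value
instance (value : Int) (out : String) : Decidable (Spec_parse_fourcc value out) := by unfold Spec_parse_fourcc; infer_instance

-- ===== CLAIM (what is proved, stated in full; the proofs are below) =====
def Claim_equal_parse_fourcc : Prop := ∀ (value : Int), Dom_parse_fourcc value → Spec_parse_fourcc value (parse_fourcc value)

-- ===== LEMMAS AND PROOFS =====

theorem pv_band255 (a : Int) : PySem.Int.band a 255 = a % 256 := by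
  unfold PySem.Int.band
  split_ifs with h1 h2 h3
  · rw [show (Int.toNat 255) = 2^8-1 from rfl, Nat.and_two_pow_sub_one_eq_mod]; omega
  · exact absurd (by norm_num) h2
  · rw [Nat.and_comm, show (Int.toNat 255) = 2^8-1 from rfl, Nat.and_two_pow_sub_one_eq_mod]; omega
  · exact absurd (by norm_num) h3

theorem pv_band32 (a : Int) : PySem.Int.band a 4294967295 = a % 4294967296 := by
  unfold PySem.Int.band
  split_ifs with h1 h2 h3
  · rw [show (Int.toNat 4294967295) = 2^32-1 from rfl, Nat.and_two_pow_sub_one_eq_mod]; omega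
  · exact absurd (by norm_num) h2
  · rw [Nat.and_comm, show (Int.toNat 4294967295) = 2^32-1 from rfl, Nat.and_two_pow_sub_one_eq_mod]; omega
  · exact absurd (by norm_num) h3

theorem pv_shr8 (a : Int) : a >>> (8 : Nat) = a / 256 := by
  cases a with
  | ofNat m =>
      show (Int.ofNat (m >>> 8)) = _
      rw [Nat.shiftRight_eq_div_pow]; norm_num
  | negSucc m =>
      show (Int.negSucc (m >>> 8)) = _
      rw [Nat.shiftRight_eq_div_pow]; norm_num; omega

theorem pv_shr16 (a : Int) : a >>> (16 : Nat) = a / 65536 := by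
  cases a with
  | ofNat m =>
      show (Int.ofNat (m >>> 16)) = _
      rw [Nat.shiftRight_eq_div_pow]; norm_num
  | negSucc m =>
      show (Int.negSucc (m >>> 16)) = _
      rw [Nat.shiftRight_eq_div_pow]; norm_num; omega

theorem pv_shr24 (a : Int) : a >>> (24 : Nat) = a / 16777216 := by
  cases a with
  | ofNat m =>
      show (Int.ofNat (m >>> 24)) = _
      rw [Nat.shiftRight_eq_div_pow]; norm_num
  | negSucc m =>
      show (Int.negSucc (m >>> 24)) = _
      rw [Nat.shiftRight_eq_div_pow]; norm_num; omega

-- round-trip of one hex digit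
theorem pv_hex_roundtrip (d : Nat) (h : d < 16) : pvHexVal (pvHexDigit d) = d := by
  unfold pvHexVal pvHexDigit
  interval_cases d <;> decide

-- ===== VERDICT (by name: the statement is the Claim_ definition above) =====
theorem parse_fourcc_spec : Claim_equal_parse_fourcc := by
  intro value _
  show parse_fourcc value = parse_fourcc_alt value
  unfold parse_fourcc parse_fourcc_alt
  rw [pv_shr8, pv_shr16, pv_shr24, pv_band255, pv_band255, pv_band255, pv_band255, pv_band32]
  simp only [List.range_succ, List.range_zero, List.nil_append, List.cons_append, List.map]
  simp only [List.getD, List.getElem?_cons_zero, List.getElem?_cons_succ,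
    Option.getD_some]
  rw [pv_hex_roundtrip _ (Nat.mod_lt _ (by norm_num)), pv_hex_roundtrip _ (Nat.mod_lt _ (by norm_num)),
      pv_hex_roundtrip _ (Nat.mod_lt _ (by norm_num)), pv_hex_roundtrip _ (Nat.mod_lt _ (by norm_num)),
      pv_hex_roundtrip _ (Nat.mod_lt _ (by norm_num)), pv_hex_roundtrip _ (Nat.mod_lt _ (by norm_num)),
      pv_hex_roundtrip _ (Nat.mod_lt _ (by norm_num)), pv_hex_roundtrip _ (Nat.mod_lt _ (by norm_num))]
  norm_num
  all_goals
    refine congrArg String.mk ?_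
    simp only [List.cons.injEq, and_true]
    exact ⟨congrArg _ (by omega), congrArg _ (by omega), congrArg _ (by omega), congrArg _ (by omega)⟩
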